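-- pv_equiv track=rewrite | github.com/rogerferrod/IALab | src/tools/labyrinths/astar.py | compute_moves
-- ===== SOURCE A (Python) =====
-- def compute_moves(state, startx, starty):
--     current = (startx, starty)
--     moves = [current]
--     for action in state:
--         if action == 'nord':
--             current = (current[0], current[1] - 1)
--         elif action == 'south':
--             current = (current[0], current[1] + 1)
--         elif action == 'est':
--             current = (current[0] + 1, current[1])
--         elif action == 'west':
--             current = (current[0] - 1, current[1])
--         moves.append(current)
--
--     return moves
-- ===== SOURCE B (Python) =====
-- _DELTAS = {'nord': (0, -1), 'south': (0, 1), 'est': (1, 0), 'west': (-1, 0)}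
--
--
-- def _cumsum(start, ds):
--     out = [start]
--     for d in ds:
--         start += d
--         out.append(start)
--     return out
--
--
-- def compute_moves(state, startx, starty):
--     deltas = [_DELTAS.get(a, (0, 0)) for a in state]
--     xs = _cumsum(startx, [d[0] for d in deltas])
--     ys = _cumsum(starty, [d[1] for d in deltas])
--     return list(zip(xs, ys))
-- ===== Notes on version B (the rewrite author's own statement) =====
-- stated objective: alternative
-- what changed: Replaces A's single interleaved if-elif accumulation loop by a table lookup mapping each action to a delta, followed by two independent scalar prefix-sum scans (one per coordinate) that are zipped into the path.
import Mathlib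
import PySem

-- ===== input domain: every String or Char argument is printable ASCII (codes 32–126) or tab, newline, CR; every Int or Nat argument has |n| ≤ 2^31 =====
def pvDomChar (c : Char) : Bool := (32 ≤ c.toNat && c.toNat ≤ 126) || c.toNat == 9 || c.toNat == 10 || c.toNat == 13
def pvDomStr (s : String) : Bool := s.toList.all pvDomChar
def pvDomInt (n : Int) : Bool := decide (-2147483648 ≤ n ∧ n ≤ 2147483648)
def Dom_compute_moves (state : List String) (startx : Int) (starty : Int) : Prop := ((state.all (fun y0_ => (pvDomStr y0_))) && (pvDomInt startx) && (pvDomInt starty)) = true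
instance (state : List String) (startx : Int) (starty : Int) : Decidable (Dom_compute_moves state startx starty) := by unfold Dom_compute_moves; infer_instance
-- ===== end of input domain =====

-- B replaces A's interleaved if-elif accumulation loop by a delta-table lookup plus two per-coordinate prefix-sum scans zipped together (alternative decomposition, same cost).


-- ===== PORT A =====
def compute_moves (state : List String) (startx : Int) (starty : Int) : List (Int × Int) :=
  (state.foldl (fun (acc : (Int × Int) × List (Int × Int)) action =>
      let current := acc.1
      let current :=
        if action == "nord" then (current.1, current.2 - 1)
        else if action == "south" then (current.1, current.2 + 1)
        else if action == "est" then (current.1 + 1, current.2)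
        else if action == "west" then (current.1 - 1, current.2)
        else current
      (current, acc.2 ++ [current]))
    ((startx, starty), [(startx, starty)])).2

-- ===== PORT B =====
-- module-level dict _DELTAS
def pvDeltasB : PySem.Dict String (Int × Int) :=
  PySem.Dict.ofList [("nord", (0, -1)), ("south", (0, 1)), ("est", (1, 0)), ("west", (-1, 0))]

-- helper _cumsum
def pvCumsumB (start : Int) (ds : List Int) : List Int :=
  (ds.foldl (fun (acc : Int × List Int) d => (acc.1 + d, acc.2 ++ [acc.1 + d]))
    (start, [start])).2

def compute_moves_alt (state : List String) (startx : Int) (starty : Int) : List (Int × Int) :=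
  let deltas := state.map (fun a => PySem.Dict.getD pvDeltasB a (0, 0))
  let xs := pvCumsumB startx (deltas.map (fun d => d.1))
  let ys := pvCumsumB starty (deltas.map (fun d => d.2))
  xs.zip ys

-- ===== PRECONDITION & SPEC =====
def Spec_compute_moves (state : List String) (startx : Int) (starty : Int) (out : List (Int × Int)) : Prop := out = compute_moves_alt state startx starty
instance (state : List String) (startx : Int) (starty : Int) (out : List (Int × Int)) : Decidable (Spec_compute_moves state startx starty out) := by unfold Spec_compute_moves; infer_instance

-- ===== CLAIM (what is proved, stated in full; the proofs are below) =====
def Claim_equal_compute_moves : Prop := ∀ (state : List String) (startx : Int) (starty : Int), Dom_compute_moves state startx starty → Spec_compute_moves state startx starty (compute_moves state startx starty)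

-- ===== LEMMAS AND PROOFS =====

-- step function of A's loop, and the delta table as a function
def pvStepA (c : Int × Int) (a : String) : Int × Int :=
  if a == "nord" then (c.1, c.2 - 1)
  else if a == "south" then (c.1, c.2 + 1)
  else if a == "est" then (c.1 + 1, c.2)
  else if a == "west" then (c.1 - 1, c.2)
  else c

def pvDelta (a : String) : Int × Int := PySem.Dict.getD pvDeltasB a (0, 0)

-- positions visited after the start, from current position c
def pvSpine (c : Int × Int) : List String → List (Int × Int)
  | [] => []
  | a :: rest =>
      let c' := pvStepA c a
      c' :: pvSpine c' rest

-- same spine, driven by the list of deltas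
def pvSpineD (c : Int × Int) : List (Int × Int) → List (Int × Int)
  | [] => []
  | d :: ds => (c.1 + d.1, c.2 + d.2) :: pvSpineD (c.1 + d.1, c.2 + d.2) ds

-- B's cumsum, spine form
def pvCs (x : Int) : List Int → List Int
  | [] => []
  | d :: ds => (x + d) :: pvCs (x + d) ds

lemma pvDelta_unknown (a : String) (h1 : ¬ a = "nord") (h2 : ¬ a = "south")
    (h3 : ¬ a = "est") (h4 : ¬ a = "west") : pvDelta a = (0, 0) := by
  simp [pvDelta, pvDeltasB, PySem.Dict.ofList, PySem.Dict.update, PySem.Dict.getD_insert,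
    h1, h2, h3, h4]

lemma pvStepA_eq (c : Int × Int) (a : String) :
    pvStepA c a = (c.1 + (pvDelta a).1, c.2 + (pvDelta a).2) := by
  by_cases h1 : a = "nord"
  · subst h1
    simp [pvStepA, show pvDelta "nord" = (0, -1) from by decide]
    omega
  by_cases h2 : a = "south"
  · subst h2
    simp [pvStepA, show pvDelta "south" = (0, 1) from by decide]
  by_cases h3 : a = "est"
  · subst h3
    simp [pvStepA, show pvDelta "est" = (1, 0) from by decide]
  by_cases h4 : a = "west"
  · subst h4
    simp [pvStepA, show pvDelta "west" = (-1, 0) from by decide]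
    omega
  simp [pvStepA, pvDelta_unknown a h1 h2 h3 h4, h1, h2, h3, h4]

lemma foldA_eq (state : List String) (c : Int × Int) (acc : List (Int × Int)) :
    (state.foldl (fun (acc : (Int × Int) × List (Int × Int)) action =>
      let current := acc.1
      let current :=
        if action == "nord" then (current.1, current.2 - 1)
        else if action == "south" then (current.1, current.2 + 1)
        else if action == "est" then (current.1 + 1, current.2)
        else if action == "west" then (current.1 - 1, current.2)
        else current
      (current, acc.2 ++ [current])) (c, acc)).2 = acc ++ pvSpine c state := by
  induction state generalizing c acc with
  | nil => simp [pvSpine]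
  | cons a rest ih =>
      simp only [List.foldl_cons, pvSpine]
      rw [ih]
      simp [pvStepA]

lemma cumsum_eq (ds : List Int) (x : Int) (acc : List Int) :
    (ds.foldl (fun (acc : Int × List Int) d => (acc.1 + d, acc.2 ++ [acc.1 + d]))
      (x, acc)).2 = acc ++ pvCs x ds := by
  induction ds generalizing x acc with
  | nil => simp [pvCs]
  | cons d ds ih =>
      simp only [List.foldl_cons, pvCs]
      rw [ih]
      simp

lemma zip_cs (state : List String) (x y : Int) :
    (pvCs x (state.map (fun a => (PySem.Dict.getD pvDeltasB a (0, 0)).1))).zip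
      (pvCs y (state.map (fun a => (PySem.Dict.getD pvDeltasB a (0, 0)).2)))
      = pvSpineD (x, y) (state.map pvDelta) := by
  induction state generalizing x y with
  | nil => simp [pvCs, pvSpineD]
  | cons a rest ih => simp [pvCs, pvSpineD, pvDelta, ih]

lemma spine_eq_spineD (state : List String) (c : Int × Int) :
    pvSpine c state = pvSpineD c (state.map pvDelta) := by
  induction state generalizing c with
  | nil => simp [pvSpine, pvSpineD]
  | cons a rest ih =>
      simp only [pvSpine, pvSpineD, List.map_cons, pvStepA_eq]
      exact congrArg _ (ih _)

-- ===== VERDICT (by name: the statement is the Claim_ definition above) =====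
theorem compute_moves_spec : Claim_equal_compute_moves := by
  intro state startx starty _
  unfold Spec_compute_moves compute_moves compute_moves_alt
  rw [foldA_eq]
  unfold pvCumsumB
  dsimp only
  rw [cumsum_eq, cumsum_eq]
  simp only [List.map_map, List.cons_append, List.nil_append, List.zip_cons_cons, Function.comp_def]
  rw [zip_cs, ← spine_eq_spineD]
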